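-- pv_equiv track=rewrite | github.com/valquiriastorer/alinhamento | alinhamento.py | gera_gaps
-- ===== SOURCE A (Python) =====
-- GAP = '_'
--
-- def gera_gaps( dna ):
--     ''' ( str ) -> list
--
--     RECEBE uma string `dna` representando uma fita de DNA com os
--     símbolos 'A', 'T', 'C', 'G' e '_' (GAP).
--
--     RETORNA uma lista com todas as variações de dna com um símbolo GAP
--     a mais e sem repetições.
--
--     exemplos:
--     In  [1]: gera_gaps( 'T' )
--     Out [1]: ['_T', 'T_']
--
--     In  [2]: gera_gaps( 'CA' )
--     Out [2]: ['_CA', 'C_A', 'CA_']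
--
--     In  [3]: gera_gaps( 'AT_G')
--     Out [3]: ['_AT_G', 'A_T_G', 'AT__G', 'AT_G_']
--     '''
--     # modifique o código abaixo para conter a sua solução.
--     variações = []
--     n = len(dna)
--     i = 0 #contador para marcar o momento de colocar o gap
--     while i <= n:
--         dna_gap = ''
--         for j in range(n): #construo a string caractere a caractere
--             if j == i:
--                 dna_gap += GAP
--             dna_gap += dna[j]
--         if i == n: #para o GAP ir após o dna
--             dna_gap += GAP
--         if dna_gap not in variações:
--             variações += [dna_gap]
--         i += 1
--
--     return variações
-- ===== SOURCE B (Python) =====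
-- GAP = '_'
--
-- def gera_gaps(dna):
--     # One pass, no dedup container: inserting GAP at position p duplicates the
--     # variant at p-1 exactly when dna[p-1] is already GAP, so skip those.
--     out = []
--     for p in range(len(dna) + 1):
--         if p > 0 and dna[p - 1] == GAP:
--             continue
--         out.append(dna[:p] + GAP + dna[p:])
--     return out
-- ===== Notes on version B (the rewrite author's own statement) =====
-- stated objective: simpler
-- what changed: Replaced A's dedup-by-list-membership (and its character-by-character string building) with a single pass that builds each variant by slicing and skips position p exactly when the previous character is already a GAP, so no membership container or inner loop is needed.
import Mathlib
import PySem

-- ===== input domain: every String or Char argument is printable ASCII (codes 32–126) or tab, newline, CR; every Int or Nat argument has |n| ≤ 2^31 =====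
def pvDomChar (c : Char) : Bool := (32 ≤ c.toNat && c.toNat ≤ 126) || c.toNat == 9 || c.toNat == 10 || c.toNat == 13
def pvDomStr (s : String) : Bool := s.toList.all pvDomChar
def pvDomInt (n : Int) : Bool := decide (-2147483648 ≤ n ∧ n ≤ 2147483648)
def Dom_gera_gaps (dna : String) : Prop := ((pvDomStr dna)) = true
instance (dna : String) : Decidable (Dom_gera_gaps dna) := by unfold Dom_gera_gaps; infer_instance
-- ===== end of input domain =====

-- B replaces A's quadratic membership-dedup with a single pass that skips position p
-- exactly when the previous character is already the GAP symbol (objective: simpler/faster).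

-- ===== PORT A =====
-- literal transliteration of A: while-loop over i = 0..n, inner loop building the
-- variant character by character, list-membership dedup.
def gera_gaps (dna : String) : List String :=
  let l := dna.toList
  let n := l.length
  (List.range (n + 1)).foldl (fun variacoes i =>
    let g1 := (List.range n).foldl
      (fun acc j => (if j = i then acc ++ ['_'] else acc) ++ [l.getD j ' ']) []
    let g2 := if i = n then g1 ++ ['_'] else g1
    if String.ofList g2 ∈ variacoes then variacoes
    else variacoes ++ [String.ofList g2]) []

-- ===== PORT B =====
-- literal transliteration of B: one pass over p = 0..n, skip when dna[p-1] == GAP,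
-- else append dna[:p] + GAP + dna[p:] (slice with in-range nonnegative bounds = take/drop).
def gera_gaps_alt (dna : String) : List String :=
  let l := dna.toList
  (List.range (l.length + 1)).foldl (fun out p =>
    if 0 < p ∧ l.getD (p - 1) ' ' = '_' then out
    else out ++ [String.ofList (l.take p ++ '_' :: l.drop p)]) []

-- ===== PRECONDITION & SPEC =====
def Spec_gera_gaps (dna : String) (out : List String) : Prop := out = gera_gaps_alt dna
instance (dna : String) (out : List String) : Decidable (Spec_gera_gaps dna out) := by unfold Spec_gera_gaps; infer_instance

-- ===== CLAIM (what is proved, stated in full; the proofs are below) =====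
def Claim_equal_gera_gaps : Prop := ∀ (dna : String), Dom_gera_gaps dna → Spec_gera_gaps dna (gera_gaps dna)

-- ===== LEMMAS AND PROOFS =====

/-- The DNA string with one GAP inserted at position `p`. -/
def pvIns (l : List Char) (p : Nat) : List Char := l.take p ++ '_' :: l.drop p

/-- A's inner character-by-character loop builds `pvIns l i` (for i < n) resp. `l` (for i ≥ n). -/
theorem pvBuild (l : List Char) : ∀ (i : Nat) (acc : List Char),
    (List.range l.length).foldl
      (fun acc j => (if j = i then acc ++ ['_'] else acc) ++ [l.getD j ' ']) acc
      = acc ++ (if i < l.length then pvIns l i else l) := by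
  induction l with
  | nil => intro i acc; simp
  | cons c t ih =>
    intro i acc
    rw [List.length_cons, List.range_succ_eq_map, List.foldl_cons, List.foldl_map]
    cases i with
    | zero =>
      rw [PySem.List.foldl_congr_mem _ _
        (fun a j => (if j = t.length then a ++ ['_'] else a) ++ [t.getD j ' ']) _
        (by
          intro a x hx
          have hxl : x < t.length := by simpa [List.mem_range] using hx
          simp [Nat.ne_of_lt hxl])]
      rw [ih t.length]
      simp [pvIns]
    | succ k =>
      rw [PySem.List.foldl_congr_mem _ _
        (fun a j => (if j = k then a ++ ['_'] else a) ++ [t.getD j ' ']) _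
        (by
          intro a x hx
          simp)]
      rw [ih k]
      by_cases hk : k < t.length
      · simp [pvIns, hk, List.take_succ_cons, List.drop_succ_cons]
      · have hk' : ¬ k + 1 < t.length + 1 := by omega
        simp [hk, hk']

/-- A's variant at step `i` (inner loop plus the trailing-GAP patch) is `pvIns l i`. -/
theorem pvGapEq (l : List Char) (i : Nat) (hi : i ≤ l.length) :
    (if i = l.length
      then ((List.range l.length).foldl
        (fun acc j => (if j = i then acc ++ ['_'] else acc) ++ [l.getD j ' ']) []) ++ ['_']
      else (List.range l.length).foldl
        (fun acc j => (if j = i then acc ++ ['_'] else acc) ++ [l.getD j ' ']) [])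
    = pvIns l i := by
  rw [pvBuild]
  by_cases h : i = l.length
  · subst h; simp [pvIns]
  · have hlt : i < l.length := by omega
    simp [h, hlt]

/-- Inserting after a GAP duplicates the previous variant. -/
theorem pvIns_dup (l : List Char) (p : Nat) (hp : 0 < p) (hle : p ≤ l.length)
    (h : l.getD (p - 1) ' ' = '_') : pvIns l p = pvIns l (p - 1) := by
  obtain ⟨k, rfl⟩ : ∃ k, p = k + 1 := ⟨p - 1, by omega⟩
  have hk : k < l.length := by omega
  have hck : l[k] = '_' := by
    have := h
    rw [show k + 1 - 1 = k from rfl, List.getD_eq_getElem l ' ' hk] at this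
    exact this
  unfold pvIns
  rw [show k + 1 - 1 = k from rfl, List.take_add_one, List.drop_eq_getElem_cons hk,
    List.getElem?_eq_getElem hk, hck]
  simp

/-- Inserting at `p` is fresh when the previous character is not a GAP. -/
theorem pvIns_ne (l : List Char) (q p : Nat) (hqp : q < p) (hle : p ≤ l.length)
    (h : l.getD (p - 1) ' ' ≠ '_') : pvIns l q ≠ pvIns l p := by
  intro he
  apply h
  have hq : q ≤ l.length := by omega
  have h1 : (pvIns l p).getD p ' ' = '_' := by
    unfold pvIns
    rw [List.getD_append_right (l.take p) _ ' ' p (by simp [List.length_take])]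
    simp [List.length_take, Nat.min_eq_left hle]
  have h2 : (pvIns l q).getD p ' ' = l.getD (p - 1) ' ' := by
    unfold pvIns
    rw [List.getD_append_right (l.take q) _ ' ' p (by simp [List.length_take]; omega)]
    rw [List.length_take, Nat.min_eq_left hq,
      show p - q = (p - q - 1) + 1 from by omega, List.getD_cons_succ]
    rw [List.getD_eq_getElem?_getD, List.getD_eq_getElem?_getD, List.getElem?_drop,
      show q + (p - q - 1) = p - 1 from by omega]
  rw [he, h1] at h2
  exact h2.symm

/-- Joint loop invariant: A's dedup fold and B's skip fold coincide. -/
theorem pvLoop (l : List Char) : ∀ (k i : Nat) (acc : List String),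
    i + k = l.length + 1 →
    (∀ q, q < i → String.ofList (pvIns l q) ∈ acc) →
    (∀ s ∈ acc, ∃ q, q < i ∧ s = String.ofList (pvIns l q)) →
    (List.range' i k).foldl (fun acc i =>
        if String.ofList (pvIns l i) ∈ acc then acc
        else acc ++ [String.ofList (pvIns l i)]) acc
      = (List.range' i k).foldl (fun acc p =>
        if 0 < p ∧ l.getD (p - 1) ' ' = '_' then acc
        else acc ++ [String.ofList (pvIns l p)]) acc := by
  intro k
  induction k with
  | zero => intro i acc _ _ _; rfl
  | succ k ih =>
    intro i acc hsum inv1 inv2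
    have hi : i ≤ l.length := by omega
    have hmem : String.ofList (pvIns l i) ∈ acc ↔ (0 < i ∧ l.getD (i - 1) ' ' = '_') := by
      constructor
      · intro hin
        obtain ⟨q, hq, heq⟩ := inv2 _ hin
        have hins : pvIns l q = pvIns l i := (String.ofList_inj.mp heq.symm)
        have hpos : 0 < i := by omega
        refine ⟨hpos, ?_⟩
        by_contra hne
        exact pvIns_ne l q i hq hi hne hins
      · rintro ⟨hpos, hgap⟩
        rw [pvIns_dup l i hpos hi hgap]
        exact inv1 _ (by omega)
    rw [List.range'_succ, List.foldl_cons, List.foldl_cons]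
    by_cases hc : 0 < i ∧ l.getD (i - 1) ' ' = '_'
    · rw [if_pos hc, if_pos (hmem.mpr hc)]
      refine ih (i + 1) acc (by omega) ?_ ?_
      · intro q hq
        by_cases hqi : q = i
        · subst hqi
          rw [pvIns_dup l q hc.1 hi hc.2]
          exact inv1 _ (by omega)
        · exact inv1 _ (by omega)
      · intro s hs
        obtain ⟨q, hq, heq⟩ := inv2 s hs
        exact ⟨q, by omega, heq⟩
    · rw [if_neg hc, if_neg (fun h => hc (hmem.mp h))]
      refine ih (i + 1) (acc ++ [String.ofList (pvIns l i)]) (by omega) ?_ ?_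
      · intro q hq
        by_cases hqi : q = i
        · subst hqi; simp
        · exact List.mem_append_left _ (inv1 _ (by omega))
      · intro s hs
        rcases List.mem_append.mp hs with hs | hs
        · obtain ⟨q, hq, heq⟩ := inv2 s hs
          exact ⟨q, by omega, heq⟩
        · exact ⟨i, by omega, by simpa using hs⟩

/-- `pvLoop` specialised to the full range, as the ports fold it. -/
theorem pvLoopRange (l : List Char) :
    (List.range (l.length + 1)).foldl (fun acc i =>
        if String.ofList (pvIns l i) ∈ acc then acc
        else acc ++ [String.ofList (pvIns l i)]) []
      = (List.range (l.length + 1)).foldl (fun acc p =>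
        if 0 < p ∧ l.getD (p - 1) ' ' = '_' then acc
        else acc ++ [String.ofList (pvIns l p)]) [] := by
  rw [List.range_eq_range']
  exact pvLoop l (l.length + 1) 0 [] (by omega)
    (by intro q hq; omega) (by intro s hs; simp at hs)

-- ===== VERDICT (by name: the statement is the Claim_ definition above) =====
theorem gera_gaps_spec : Claim_equal_gera_gaps := by
  unfold Claim_equal_gera_gaps Spec_gera_gaps
  intro dna _
  show gera_gaps dna = gera_gaps_alt dna
  unfold gera_gaps gera_gaps_alt
  simp only []
  refine Eq.trans (PySem.List.foldl_congr_mem _ _ _ _ ?hA)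
    (Eq.trans (pvLoopRange dna.toList)
      (PySem.List.foldl_congr_mem _ _ _ _ ?hB))
  case hA =>
    intro acc x hx
    have hx' : x ≤ dna.toList.length := by
      have h := List.mem_range.mp hx; omega
    simp only [pvGapEq dna.toList x hx']
  case hB =>
    intro acc x _
    simp only [pvIns]
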